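-- pv_equiv track=rewrite | github.com/LarryWang2718/AI-Cube-Solver | pattern_databases.py | combination_index
-- ===== SOURCE A (Python) =====
-- from math import comb
--
-- _COMB_CACHE = {}
--
-- def _get_comb(n, k):
--     """Get binomial coefficient with caching for common cases."""
--     if n < 0 or k < 0 or k > n:
--         return 0
--     if k == 0 or k == n:
--         return 1
--     # Use cache for smaller values (most common in our use case)
--     if n <= 12 and k <= 6:
--         key = (n, k)
--         if key not in _COMB_CACHE:
--             _COMB_CACHE[key] = comb(n, k)
--         return _COMB_CACHE[key]
--     return comb(n, k)
--
-- def combination_index(combination, n, k, start_idx=0):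
--     """
--     Encode a combination of k elements from n as an index.
--     combination should be sorted list of k distinct elements from [0..n-1]
--     Returns index in range [0, C(n,k)-1]
--
--     Optimized version using cached binomial coefficients and avoiding list copies.
--     """
--     if k == 0:
--         return 0
--
--     # Use start_idx to avoid creating sublists (optimization for recursive calls)
--     first = combination[start_idx]
--     index = 0
--
--     # Sum C(n-1-j, k-1) for j < first (using cached comb)
--     for j in range(first):
--         index += _get_comb(n - 1 - j, k - 1)
--
--     # Add index of remaining combination (recursive, but pass start_idx instead of creating list)
--     if k > 1:
--         # Adjust combination values: for remaining[i], original value is combination[start_idx+1+i]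
--         # In the recursive call, we treat it as if it's starting from 0, so we subtract (first+1)
--         # But we can avoid creating a new list by adjusting the values on-the-fly
--         # Actually, we need to pass the adjusted values... let's just create the small list
--         # (for k=6, this creates at most 5 elements, which is acceptable)
--         remaining_len = k - 1
--         remaining = [0] * remaining_len
--         for i in range(remaining_len):
--             remaining[i] = combination[start_idx + 1 + i] - first - 1
--         index += combination_index(remaining, n - first - 1, k - 1)
--
--     return index
-- ===== SOURCE B (Python) =====
-- from math import comb
--
-- def _comb(n, k):
--     """Binomial coefficient with the usual convention: 0 outside 0 <= k <= n."""
--     return comb(n, k) if 0 <= k <= n else 0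
--
-- def combination_index(combination, n, k, start_idx=0):
--     """Lexicographic rank of the combination, one O(1) level per element:
--     the inner sum of C(n-1-j, k-1) telescopes to C(n,k) - C(n-first,k)
--     (hockey-stick identity), and an offset replaces the shifted sublists."""
--     index = 0
--     off = 0
--     for i in range(k):
--         first = combination[start_idx + i] - off
--         if first > 0:
--             index += _comb(n, k - i) - _comb(n - first, k - i)
--         n -= first + 1
--         off += first + 1
--     return index
-- ===== Notes on version B (the rewrite author's own statement) =====
-- stated objective: faster
-- what changed: B replaces A's inner summation loop (sum of C(n-1-j,k-1) over j<first) and recursion on freshly built shifted sublists with a single O(1) hockey-stick step per element, C(n,k)-C(n-first,k), carrying a running offset instead of rebuilding lists.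
import Mathlib
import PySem

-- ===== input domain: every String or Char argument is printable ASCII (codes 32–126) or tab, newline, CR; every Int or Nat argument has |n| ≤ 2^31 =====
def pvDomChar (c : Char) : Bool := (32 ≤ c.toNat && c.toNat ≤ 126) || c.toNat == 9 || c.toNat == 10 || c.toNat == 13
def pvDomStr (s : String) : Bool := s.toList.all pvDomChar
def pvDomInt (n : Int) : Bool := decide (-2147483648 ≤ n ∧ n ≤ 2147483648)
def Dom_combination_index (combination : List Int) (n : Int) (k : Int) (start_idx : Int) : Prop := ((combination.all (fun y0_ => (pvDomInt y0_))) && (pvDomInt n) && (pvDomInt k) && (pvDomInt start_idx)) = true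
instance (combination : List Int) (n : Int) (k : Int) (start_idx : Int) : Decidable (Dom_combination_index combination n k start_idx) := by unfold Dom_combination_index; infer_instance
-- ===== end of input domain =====

-- B replaces A's inner summation loop and recursion on shifted sublists by one O(1) hockey-stick step per element.

-- ===== PORT A =====
-- _get_comb: the cache is not observable, ported as the same case analysis over math.comb
def pvGetComb (n : Int) (k : Int) : Int :=
  if n < 0 ∨ k < 0 ∨ k > n then 0
  else if k = 0 ∨ k = n then 1
  else (Nat.choose n.toNat k.toNat : Int)

def combination_index (combination : List Int) (n : Int) (k : Int) (start_idx : Int) : Int :=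
  if k = 0 then 0
  else
    -- combination[start_idx]: Python raises IndexError when out of range; excluded by Pre_
    let first := (PySem.List.pyGet? combination start_idx).getD 0
    let index := (PySem.List.pyRange 0 first 1).foldl
      (fun idx j => idx + pvGetComb (n - 1 - j) (k - 1)) 0
    if 1 < k then
      let remaining := (List.range (k - 1).toNat).map
        (fun (i : Nat) => (PySem.List.pyGet? combination (start_idx + 1 + (i : Int))).getD 0 - first - 1)
      index + combination_index remaining (n - first - 1) (k - 1) 0
    else index
termination_by k.toNat
decreasing_by omega

-- ===== PORT B =====
-- _comb of Source B: math.comb inside 0 <= r <= m (where Nat.choose is exact), 0 outside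
def pyComb (m : Int) (r : Int) : Int :=
  if 0 ≤ r ∧ r ≤ m then (Nat.choose m.toNat r.toNat : Int) else 0

def combination_index_alt (combination : List Int) (n : Int) (k : Int) (start_idx : Int) : Int :=
  ((List.range k.toNat).foldl
    (fun (st : Int × Int × Int) (i : Nat) =>
      let first := (PySem.List.pyGet? combination (start_idx + (i : Int))).getD 0 - st.2.2
      let index := if 0 < first
        then st.1 + (pyComb st.2.1 (k - (i : Int)) - pyComb (st.2.1 - first) (k - (i : Int)))
        else st.1
      (index, st.2.1 - first - 1, st.2.2 + first + 1))
    (0, n, 0)).1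

-- ===== PRECONDITION & SPEC =====
-- Pre_ excludes exactly the inputs on which the Python A raises an IndexError: k nonzero with one of the
-- looked-up positions start_idx .. start_idx+k-1 out of range (negative positions index from the end).
def Pre_combination_index (combination : List Int) (n : Int) (k : Int) (start_idx : Int) : Prop :=
  (k < 0 ∧ PySem.Raise.InRange combination.length start_idx) ∨ k = 0 ∨
  (0 < k ∧ -(combination.length : Int) ≤ start_idx ∧ start_idx + k ≤ (combination.length : Int))
instance (combination : List Int) (n : Int) (k : Int) (start_idx : Int) : Decidable (Pre_combination_index combination n k start_idx) := by unfold Pre_combination_index; infer_instance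

def pvWitness_combination_index : List Int × Int × Int × Int := ([0, 2, 3], 4, 3, 0)

def Spec_combination_index (combination : List Int) (n : Int) (k : Int) (start_idx : Int) (out : Int) : Prop := out = combination_index_alt combination n k start_idx
instance (combination : List Int) (n : Int) (k : Int) (start_idx : Int) (out : Int) : Decidable (Spec_combination_index combination n k start_idx out) := by unfold Spec_combination_index; infer_instance

-- ===== CLAIM (what is proved, stated in full; the proofs are below) =====
def Claim_equal_combination_index : Prop := ∀ (combination : List Int) (n : Int) (k : Int) (start_idx : Int), Dom_combination_index combination n k start_idx → Pre_combination_index combination n k start_idx → Spec_combination_index combination n k start_idx (combination_index combination n k start_idx)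

-- ===== LEMMAS AND PROOFS =====

-- the looked-up elements, as a list
def pvWlist (c : List Int) (s : Int) (m : Nat) : List Int :=
  (List.range m).map (fun (i : Nat) => (PySem.List.pyGet? c (s + (i : Int))).getD 0)

-- the common per-level closed form both ports compute
def pvSpec : List Int → Int → Int → Int
  | [], _, _ => 0
  | a :: t, n, k =>
      (if 0 < a then pyComb n k - pyComb (n - a) k else 0) +
      pvSpec (t.map (fun x => x - (a + 1))) (n - a - 1) (k - 1)
termination_by w _ _ => w.length
decreasing_by simp

lemma pvGetComb_eq_pyComb (n k : Int) : pvGetComb n k = pyComb n k := by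
  unfold pvGetComb pyComb
  by_cases h1 : n < 0 ∨ k < 0 ∨ k > n
  · rw [if_pos h1, if_neg (by omega)]
  · rw [if_neg h1, if_pos (⟨by omega, by omega⟩ : 0 ≤ k ∧ k ≤ n)]
    split_ifs with h2
    · rcases h2 with h | h
      · subst h; simp
      · subst h; rw [Nat.choose_self]; simp
    · rfl

-- Pascal's rule for pyComb, valid for every m when 1 <= k
lemma pyComb_pascal (m k : Int) (hk : 1 ≤ k) :
    pyComb m k = pyComb (m - 1) (k - 1) + pyComb (m - 1) k := by
  unfold pyComb
  by_cases hkm : k ≤ m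
  · rw [if_pos ⟨by omega, hkm⟩, if_pos ⟨by omega, by omega⟩]
    by_cases hke : k = m
    · rw [if_neg (by omega)]
      subst hke
      rw [show k.toNat = k.toNat from rfl, Nat.choose_self,
          show (k - 1).toNat = (k - 1).toNat from rfl, Nat.choose_self]
      simp
    · rw [if_pos ⟨by omega, by omega⟩]
      have hm1 : m.toNat = (m - 1).toNat + 1 := by omega
      have hk1 : k.toNat = (k - 1).toNat + 1 := by omega
      rw [hm1, hk1, Nat.choose_succ_succ]
      push_cast
      ring
  · rw [if_neg (by omega), if_neg (by omega), if_neg (by omega)]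
    simp

-- hockey stick: A's summation loop telescopes to pyComb n k - pyComb (n - f) k
lemma pvHockey (f : Nat) (n k acc : Int) (hk : 1 ≤ k) :
    (PySem.List.pyRange 0 (f : Int) 1).foldl (fun idx j => idx + pvGetComb (n - 1 - j) (k - 1)) acc
      = acc + pyComb n k - pyComb (n - f) k := by
  induction f generalizing acc with
  | zero =>
    rw [PySem.List.pyRange_one_eq_nil (by omega)]
    simp
  | succ m ih =>
    rw [show ((m + 1 : Nat) : Int) = (m : Int) + 1 by push_cast; ring]
    rw [PySem.List.pyRange_one_succ_right (by omega), List.foldl_append, ih]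
    simp only [List.foldl_cons, List.foldl_nil]
    rw [pvGetComb_eq_pyComb]
    have hp := pyComb_pascal (n - m) k hk
    rw [show n - 1 - (m : Int) = n - (m : Int) - 1 from by ring] at *
    rw [show n - ((m : Int) + 1) = n - (m : Int) - 1 from by ring]
    linarith [hp]

-- A's summation loop adds only zeros when k ≤ 0
lemma pvLoopZero (l : List Int) (n k acc : Int) (hk : k ≤ 0) :
    l.foldl (fun idx j => idx + pvGetComb (n - 1 - j) (k - 1)) acc = acc := by
  induction l generalizing acc with
  | nil => rfl
  | cons x xs ih =>
    rw [List.foldl_cons]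
    have h0 : pvGetComb (n - 1 - x) (k - 1) = 0 := by
      unfold pvGetComb
      rw [if_pos (by omega)]
    rw [h0, add_zero, ih]

lemma pvWlist_succ (c : List Int) (s : Int) (m : Nat) :
    pvWlist c s (m + 1)
      = (PySem.List.pyGet? c s).getD 0 :: pvWlist c (s + 1) m := by
  unfold pvWlist
  rw [List.range_succ_eq_map, List.map_cons, List.map_map]
  congr 1
  · simp
  · apply List.map_congr_left
    intro i _
    simp only [Function.comp_apply]
    congr 2
    push_cast
    ring

lemma pvWlist_getD (c : List Int) (s : Int) (m : Nat) (i : Nat) (hi : i < m) :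
    (pvWlist c s m).getD i 0 = (PySem.List.pyGet? c (s + (i : Int))).getD 0 := by
  unfold pvWlist
  rw [List.getD_eq_getElem _ 0 (by simp [hi])]
  simp

lemma pvMapMapSub (t : List Int) (d e : Int) :
    (t.map (fun x => x - d)).map (fun x => x - e) = t.map (fun x => x - (d + e)) := by
  rw [List.map_map]
  apply List.map_congr_left
  intro x _
  simp only [Function.comp_apply]
  ring

-- A's port computes pvSpec of the looked-up elements, by induction on k
lemma pvAEq (kn : Nat) : ∀ (c : List Int) (n s : Int),
    combination_index c n (kn : Int) s = pvSpec (pvWlist c s kn) n (kn : Int) := by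
  induction kn with
  | zero =>
    intro c n s
    rw [combination_index]
    simp [pvWlist, pvSpec]
  | succ m ih =>
    intro c n s
    have hne : ((m + 1 : Nat) : Int) ≠ 0 := by omega
    rw [combination_index, if_neg hne, pvWlist_succ]
    set a : Int := (PySem.List.pyGet? c s).getD 0 with hadef
    rw [pvSpec]
    have hloop : (PySem.List.pyRange 0 a 1).foldl
        (fun idx j => idx + pvGetComb (n - 1 - j) ((m + 1 : Nat) - 1)) 0
        = (if 0 < a then pyComb n ((m + 1 : Nat) : Int) - pyComb (n - a) ((m + 1 : Nat) : Int) else 0) := by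
      by_cases hpos : 0 < a
      · rw [if_pos hpos]
        have hcast : a = ((a.toNat : Nat) : Int) := by omega
        rw [hcast, pvHockey a.toNat n ((m + 1 : Nat) : Int) 0 (by omega)]
        rw [← hcast]
        ring
      · rw [if_neg hpos, PySem.List.pyRange_one_eq_nil (by omega)]
        rfl
    by_cases hm : m = 0
    · subst hm
      rw [if_neg (by omega)]
      simp only [hloop]
      rw [show pvWlist c (s + 1) 0 = [] from rfl, List.map_nil]
      rw [show pvSpec [] (n - a - 1) (((0 + 1 : Nat) : Int) - 1) = 0 from by simp [pvSpec]]
      ring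
    · rw [if_pos (by omega)]
      simp only [hloop]
      rw [show ((m + 1 : Nat) : Int) - 1 = (m : Int) from by push_cast; ring]
      have hrem : (List.range ((m : Int)).toNat).map
          (fun (i : Nat) => (PySem.List.pyGet? c (s + 1 + (i : Int))).getD 0 - a - 1)
          = (pvWlist c (s + 1) m).map (fun x => x - (a + 1)) := by
        rw [show (((m : Int)).toNat) = m from by omega]
        unfold pvWlist
        rw [List.map_map]
        apply List.map_congr_left
        intro i _
        simp only [Function.comp_apply]
        ring
      rw [hrem, ih]
      -- the looked-up elements of the shifted list are the shifted looked-up elements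
      have hwl : pvWlist ((pvWlist c (s + 1) m).map (fun x => x - (a + 1))) 0 m
          = (pvWlist c (s + 1) m).map (fun x => x - (a + 1)) := by
        unfold pvWlist
        apply List.ext_getElem
        · simp
        · intro i h1 h2
          simp only [List.getElem_map, List.getElem_range]
          rw [PySem.List.pyGet?_of_nonneg _ (by omega)]
          rw [show ((0 : Int) + (i : Int)).toNat = i from by omega]
          rw [List.getElem?_eq_getElem (by simpa using h2)]
          simp
      rw [hwl]

-- B's loop with state (index, n, off) computes pvSpec of the off-shifted elements
lemma pvBfold (w : List Int) : ∀ (n k off total : Int),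
    ((List.range w.length).foldl
      (fun (st : Int × Int × Int) (i : Nat) =>
        (if 0 < w.getD i 0 - st.2.2
           then st.1 + (pyComb st.2.1 (k - (i : Int)) - pyComb (st.2.1 - (w.getD i 0 - st.2.2)) (k - (i : Int)))
           else st.1,
         st.2.1 - (w.getD i 0 - st.2.2) - 1, st.2.2 + (w.getD i 0 - st.2.2) + 1))
      (total, n, off)).1
      = total + pvSpec (w.map (fun x => x - off)) n k := by
  induction w with
  | nil =>
    intro n k off total
    simp [pvSpec]
  | cons a t ih =>
    intro n k off total
    rw [List.length_cons, List.range_succ_eq_map, List.foldl_cons, List.foldl_map]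
    simp only [List.getD_cons_zero, List.getD_cons_succ, Nat.cast_zero, sub_zero, Nat.cast_succ]
    rw [PySem.List.foldl_congr_mem _ _
      (fun (st : Int × Int × Int) (x : Nat) =>
        (if 0 < t.getD x 0 - st.2.2
           then st.1 + (pyComb st.2.1 (k - 1 - (x : Int)) - pyComb (st.2.1 - (t.getD x 0 - st.2.2)) (k - 1 - (x : Int)))
           else st.1,
         st.2.1 - (t.getD x 0 - st.2.2) - 1, st.2.2 + (t.getD x 0 - st.2.2) + 1))
      _ (by
        intro st x _
        rw [show k - ((x : Int) + 1) = k - 1 - (x : Int) from by ring])]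
    rw [ih (n - (a - off) - 1) (k - 1) (off + (a - off) + 1)]
    rw [List.map_cons, pvSpec, pvMapMapSub]
    rw [show off + (a - off + 1) = off + (a - off) + 1 from by ring]
    split_ifs with h <;> ring

-- B's port equals pvSpec of the looked-up elements
lemma pvAltEq (c : List Int) (n k s : Int) :
    combination_index_alt c n k s = pvSpec (pvWlist c s k.toNat) n k := by
  unfold combination_index_alt
  have hlen : (pvWlist c s k.toNat).length = k.toNat := by
    unfold pvWlist; simp
  have hcong : (List.range k.toNat).foldl
      (fun (st : Int × Int × Int) (i : Nat) =>
        let first := (PySem.List.pyGet? c (s + (i : Int))).getD 0 - st.2.2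
        let index := if 0 < first
          then st.1 + (pyComb st.2.1 (k - (i : Int)) - pyComb (st.2.1 - first) (k - (i : Int)))
          else st.1
        (index, st.2.1 - first - 1, st.2.2 + first + 1))
      (0, n, 0)
      = (List.range (pvWlist c s k.toNat).length).foldl
      (fun (st : Int × Int × Int) (i : Nat) =>
        (if 0 < (pvWlist c s k.toNat).getD i 0 - st.2.2
           then st.1 + (pyComb st.2.1 (k - (i : Int)) - pyComb (st.2.1 - ((pvWlist c s k.toNat).getD i 0 - st.2.2)) (k - (i : Int)))
           else st.1,
         st.2.1 - ((pvWlist c s k.toNat).getD i 0 - st.2.2) - 1,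
         st.2.2 + ((pvWlist c s k.toNat).getD i 0 - st.2.2) + 1))
      (0, n, 0) := by
    rw [hlen]
    apply PySem.List.foldl_congr_mem
    intro st i hi
    rw [pvWlist_getD c s k.toNat i (List.mem_range.mp hi)]
  rw [hcong, pvBfold (pvWlist c s k.toNat) n k 0 0]
  rw [show (pvWlist c s k.toNat).map (fun x => x - 0) = pvWlist c s k.toNat from by simp]
  ring

theorem combination_index_spec : Claim_equal_combination_index := by
  intro c n k s _ hpre
  unfold Spec_combination_index
  rcases hpre with ⟨hkneg, -⟩ | hk0 | ⟨hkpos, -⟩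
  · rw [combination_index, if_neg (by omega)]
    rw [if_neg (by omega : ¬ 1 < k)]
    rw [pvLoopZero _ n k 0 (by omega)]
    rw [pvAltEq, show k.toNat = 0 from by omega]
    simp [pvWlist, pvSpec]
  · subst hk0
    rw [combination_index, if_pos rfl, pvAltEq]
    simp [pvWlist, pvSpec]
  · rw [pvAltEq]
    have hknat : k = ((k.toNat : Nat) : Int) := by omega
    rw [hknat, pvAEq k.toNat c n s, Int.toNat_natCast]
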